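-- pv_equiv track=rewrite | github.com/dmlgus1922/MachineLearning | problemSolving/대문자 소문자.py | upper_lower
-- ===== SOURCE A (Python) =====
-- def upper_lower(st):
--     string_l = []
--     for s in st:
--         if s == ' ':
--             string_l.append(s)
--         elif s.isalpha():
--             if s.isupper():
--                 string_l.append(s.lower())
--             else:
--                 string_l.append(s.upper())
--         else:
--             string_l.append('@')
--             return string_l
--
--     return string_l
-- ===== SOURCE B (Python) =====
-- def upper_lower(st):
--     stop = next((j for j, c in enumerate(st) if c != ' ' and not c.isalpha()), None)
--     prefix = st if stop is None else st[:stop]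
--     out = [c if c == ' ' else (c.lower() if c.isupper() else c.upper()) for c in prefix]
--     if stop is not None:
--         out.append('@')
--     return out
-- ===== Notes on version B (the rewrite author's own statement) =====
-- stated objective: alternative
-- what changed: B first locates the index of the first non-space non-alpha character (single scan yielding an optional index), then maps the prefix with a comprehension and appends '@' if a stop index exists, replacing A's single loop with append-accumulator and mid-loop early return.
import Mathlib
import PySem

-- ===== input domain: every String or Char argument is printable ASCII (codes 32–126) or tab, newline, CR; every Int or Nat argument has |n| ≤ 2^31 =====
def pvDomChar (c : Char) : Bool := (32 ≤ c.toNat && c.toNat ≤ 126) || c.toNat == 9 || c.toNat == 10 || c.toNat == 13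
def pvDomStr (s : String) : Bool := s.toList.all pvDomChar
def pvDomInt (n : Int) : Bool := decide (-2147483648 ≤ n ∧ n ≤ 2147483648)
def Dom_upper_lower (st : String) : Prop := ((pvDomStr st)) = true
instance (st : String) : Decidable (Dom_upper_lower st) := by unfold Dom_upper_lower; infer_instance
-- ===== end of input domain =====

-- B replaces A's append-accumulator loop with early return by: find the first
-- non-space non-alpha index, map that prefix, append '@' if such an index exists.
-- Same values everywhere (alternative decomposition, same cost).

-- ===== PORT A =====
-- A's loop: per character append; on any char that is neither ' ' nor alpha,
-- append '@' and return immediately.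
def upperLowerGo : List Char → List String
| [] => []
| c :: rest =>
  if c = ' ' then String.ofList [c] :: upperLowerGo rest
  else if PySem.Chars.isalpha c then
    (if PySem.Chars.isupper c then String.ofList [PySem.Chars.lowerChar c]
     else String.ofList [PySem.Chars.upperChar c]) :: upperLowerGo rest
  else ["@"]

def upper_lower (st : String) : List String := upperLowerGo st.toList

-- ===== PORT B =====
-- Source B: stop = first index j with st[j] != ' ' and not st[j].isalpha() (None if absent)
def pvBadChar (c : Char) : Bool := c ≠ ' ' && ! PySem.Chars.isalpha c

-- the per-char mapping of Source B's comprehension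
def pvMapChar (c : Char) : String :=
  if c = ' ' then String.ofList [c]
  else if PySem.Chars.isupper c then String.ofList [PySem.Chars.lowerChar c]
  else String.ofList [PySem.Chars.upperChar c]

def upper_lower_alt (st : String) : List String :=
  let stop := st.toList.findIdx? pvBadChar
  let prefix_ := match stop with
    | none => st.toList
    | some j => st.toList.take j
  prefix_.map pvMapChar ++ (if stop.isSome then ["@"] else [])

-- ===== PRECONDITION & SPEC =====
def Spec_upper_lower (st : String) (out : List String) : Prop := out = upper_lower_alt st
instance (st : String) (out : List String) : Decidable (Spec_upper_lower st out) := by unfold Spec_upper_lower; infer_instance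

-- ===== CLAIM (what is proved, stated in full; the proofs are below) =====
def Claim_equal_upper_lower : Prop := ∀ (st : String), Dom_upper_lower st → Spec_upper_lower st (upper_lower st)

-- ===== LEMMAS AND PROOFS =====
theorem upperLowerGo_eq (cs : List Char) :
    upperLowerGo cs =
      (match cs.findIdx? pvBadChar with
        | none => cs
        | some j => cs.take j).map pvMapChar ++
      (if (cs.findIdx? pvBadChar).isSome then ["@"] else []) := by
  induction cs with
  | nil => simp [upperLowerGo]
  | cons c rest ih =>
    rw [List.findIdx?_cons]
    by_cases hb : pvBadChar c = true
    · have h1 : ¬ c = ' ' := by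
        intro h; simp [pvBadChar, h] at hb
      have h2 : PySem.Chars.isalpha c = false := by
        cases h : PySem.Chars.isalpha c
        · rfl
        · simp [pvBadChar, h] at hb
      simp [upperLowerGo, h1, h2, hb]
    · have hb' : pvBadChar c = false := by simpa using hb
      rw [if_neg (by simp [hb'])]
      by_cases hsp : c = ' '
      · subst hsp
        simp [upperLowerGo, ih]
        cases h : List.findIdx? pvBadChar rest <;> simp [h, pvMapChar]
      · have ha : PySem.Chars.isalpha c = true := by
          cases h : PySem.Chars.isalpha c
          · simp [pvBadChar, hsp, h] at hb'
          · rfl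
        simp [upperLowerGo, hsp, ha, ih]
        cases h : List.findIdx? pvBadChar rest <;> simp [h, pvMapChar, hsp]

-- ===== VERDICT (by name: the statement is the Claim_ definition above) =====
theorem upper_lower_spec : Claim_equal_upper_lower := by
  intro st _
  show upper_lower st = upper_lower_alt st
  simp [upper_lower, upper_lower_alt, upperLowerGo_eq]
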